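-- pv_equiv track=rewrite | github.com/Vyom88/Sudoku_Solver | Suduko.py | blockCal
-- ===== SOURCE A (Python) =====
-- def blockCal(arr, lisnine, posr, posc, block):
--     if block == 1:
--         for i in range(3):
--             for j in range(3):
--                 if arr[i][j] in lisnine:
--                     lisnine.remove(arr[i][j])
--
--     elif block == 2:
--         for i in range(3):
--             for j in range(3, 6):
--                 if arr[i][j] in lisnine:
--                     lisnine.remove(arr[i][j])
--
--     elif block == 3:
--         for i in range(3):
--             for j in range(6, 9):
--                 if arr[i][j] in lisnine:
--                     lisnine.remove(arr[i][j])
--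
--     elif block == 4:
--         for i in range(3, 6):
--             for j in range(3):
--                 if arr[i][j] in lisnine:
--                     lisnine.remove(arr[i][j])
--
--     elif block == 5:
--         for i in range(3, 6):
--             for j in range(3, 6):
--                 if arr[i][j] in lisnine:
--                     lisnine.remove(arr[i][j])
--
--     elif block == 6:
--         for i in range(3, 6):
--             for j in range(6, 9):
--                 if arr[i][j] in lisnine:
--                     lisnine.remove(arr[i][j])
--
--     elif block == 7:
--         for i in range(6, 9):
--             for j in range(3):
--                 if arr[i][j] in lisnine:
--                     lisnine.remove(arr[i][j])
--
--     elif block == 8: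
--         for i in range(6, 9):
--             for j in range(3, 6):
--                 if arr[i][j] in lisnine:
--                     lisnine.remove(arr[i][j])
--
--     elif block == 9:
--         for i in range(6, 9):
--             for j in range(6, 9):
--                 if arr[i][j] in lisnine:
--                     lisnine.remove(arr[i][j])
--
--     return lisnine
-- ===== SOURCE B (Python) =====
-- def blockCal(arr, lisnine, posr, posc, block):
--     if 1 <= block <= 9:
--         r0 = 3 * ((block - 1) // 3)
--         c0 = 3 * ((block - 1) % 3)
--         # multiset of the block's values, built once
--         cnt = {}
--         for i in range(r0, r0 + 3):
--             for j in range(c0, c0 + 3):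
--                 cnt[arr[i][j]] = cnt.get(arr[i][j], 0) + 1
--         # one pass over the candidates: drop each value as many times as it
--         # occurs in the block, keep the rest (same first-occurrence semantics)
--         kept = []
--         for x in lisnine:
--             if cnt.get(x, 0) > 0:
--                 cnt[x] -= 1
--             else:
--                 kept.append(x)
--         lisnine[:] = kept
--     return lisnine
-- ===== Notes on version B (the rewrite author's own statement) =====
-- stated objective: alternative
-- what changed: Instead of scanning the block and calling `in`/`remove` on the candidate list for each of the nine cells (nine passes over lisnine), B builds a count dictionary of the block's values once and then makes a single pass over lisnine, dropping each value as many times as it occurs in the block; the list is updated in place at the end.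
import Mathlib
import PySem

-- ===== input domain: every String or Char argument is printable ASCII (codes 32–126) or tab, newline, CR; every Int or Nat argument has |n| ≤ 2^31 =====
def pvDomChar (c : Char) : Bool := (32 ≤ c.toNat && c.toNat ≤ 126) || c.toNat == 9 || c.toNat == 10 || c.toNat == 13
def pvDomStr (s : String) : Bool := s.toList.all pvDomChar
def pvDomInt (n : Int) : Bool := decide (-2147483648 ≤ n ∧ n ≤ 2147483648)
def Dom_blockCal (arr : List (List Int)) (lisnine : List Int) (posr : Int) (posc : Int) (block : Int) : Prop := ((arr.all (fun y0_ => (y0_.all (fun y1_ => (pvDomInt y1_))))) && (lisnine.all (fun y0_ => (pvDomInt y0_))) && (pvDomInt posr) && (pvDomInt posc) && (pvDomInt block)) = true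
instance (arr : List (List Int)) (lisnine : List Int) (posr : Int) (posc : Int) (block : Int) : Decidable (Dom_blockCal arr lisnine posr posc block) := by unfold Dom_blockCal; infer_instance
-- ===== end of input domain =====

-- B replaces A's nine branch-selected block scans that call `in`/`remove` on the candidate
-- list for each cell with a one-pass multiset-subtraction: a count dict of the block's values
-- is built once, then a single pass over lisnine drops each value as many times as it occurs
-- in the block.  Both Pythons mutate lisnine in place to the same final content and return it;
-- the equivalence proved here is about the return value.

-- ===== PORT A =====
-- shared trivial cell access: arr[i][j] (total form; defined exactly where Pre_ holds)
def pvCell (arr : List (List Int)) (i j : Int) : Int :=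
  PySem.List.pyGetD (PySem.List.pyGetD arr i []) j 0

-- inner body of A: `if arr[i][j] in lisnine: lisnine.remove(arr[i][j])` (remove = erase first occurrence)
def pvStep (arr : List (List Int)) (i : Int) (ls : List Int) (j : Int) : List Int :=
  if ls.contains (pvCell arr i j) then ls.erase (pvCell arr i j) else ls

def blockCal (arr : List (List Int)) (lisnine : List Int) (posr : Int) (posc : Int) (block : Int) : List Int :=
  if block = 1 then
    (PySem.List.pyRange 0 3 1).foldl (fun ls i => (PySem.List.pyRange 0 3 1).foldl (pvStep arr i) ls) lisnine
  else if block = 2 then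
    (PySem.List.pyRange 0 3 1).foldl (fun ls i => (PySem.List.pyRange 3 6 1).foldl (pvStep arr i) ls) lisnine
  else if block = 3 then
    (PySem.List.pyRange 0 3 1).foldl (fun ls i => (PySem.List.pyRange 6 9 1).foldl (pvStep arr i) ls) lisnine
  else if block = 4 then
    (PySem.List.pyRange 3 6 1).foldl (fun ls i => (PySem.List.pyRange 0 3 1).foldl (pvStep arr i) ls) lisnine
  else if block = 5 then
    (PySem.List.pyRange 3 6 1).foldl (fun ls i => (PySem.List.pyRange 3 6 1).foldl (pvStep arr i) ls) lisnine
  else if block = 6 then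
    (PySem.List.pyRange 3 6 1).foldl (fun ls i => (PySem.List.pyRange 6 9 1).foldl (pvStep arr i) ls) lisnine
  else if block = 7 then
    (PySem.List.pyRange 6 9 1).foldl (fun ls i => (PySem.List.pyRange 0 3 1).foldl (pvStep arr i) ls) lisnine
  else if block = 8 then
    (PySem.List.pyRange 6 9 1).foldl (fun ls i => (PySem.List.pyRange 3 6 1).foldl (pvStep arr i) ls) lisnine
  else if block = 9 then
    (PySem.List.pyRange 6 9 1).foldl (fun ls i => (PySem.List.pyRange 6 9 1).foldl (pvStep arr i) ls) lisnine
  else lisnine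

-- ===== PORT B =====
def blockCal_alt (arr : List (List Int)) (lisnine : List Int) (posr : Int) (posc : Int) (block : Int) : List Int :=
  if 1 ≤ block ∧ block ≤ 9 then
    let r0 := 3 * PySem.Int.floordiv (block - 1) 3
    let c0 := 3 * PySem.Int.mod (block - 1) 3
    -- cnt[arr[i][j]] = cnt.get(arr[i][j], 0) + 1  over the block's cells
    let cnt := (PySem.List.pyRange r0 (r0 + 3) 1).foldl
      (fun d i => (PySem.List.pyRange c0 (c0 + 3) 1).foldl
        (fun d j => d.modify (pvCell arr i j) 0 (· + 1)) d)
      (PySem.Dict.empty : PySem.Dict Int Int)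
    -- one pass over lisnine: skip-and-decrement or keep
    (lisnine.foldl
      (fun (st : PySem.Dict Int Int × List Int) x =>
        if st.1.getD x 0 > 0 then (st.1.modify x 0 (· - 1), st.2)
        else (st.1, st.2 ++ [x]))
      (cnt, [])).2
  else lisnine

-- ===== PRECONDITION & SPEC =====
-- Pre_ excludes exactly the inputs on which Python A raises IndexError: block in 1..9 but the
-- block's nine cells arr[i][j] do not all exist.
def Pre_blockCal (arr : List (List Int)) (lisnine : List Int) (posr : Int) (posc : Int) (block : Int) : Prop :=
  (1 ≤ block ∧ block ≤ 9) →
    (∀ i ∈ [3 * PySem.Int.floordiv (block - 1) 3, 3 * PySem.Int.floordiv (block - 1) 3 + 1,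
            3 * PySem.Int.floordiv (block - 1) 3 + 2],
      (PySem.List.pyGet? arr i).isSome ∧
      ∀ j ∈ [3 * PySem.Int.mod (block - 1) 3, 3 * PySem.Int.mod (block - 1) 3 + 1,
             3 * PySem.Int.mod (block - 1) 3 + 2],
        (PySem.List.pyGet? ((PySem.List.pyGet? arr i).getD []) j).isSome)
instance (arr : List (List Int)) (lisnine : List Int) (posr : Int) (posc : Int) (block : Int) : Decidable (Pre_blockCal arr lisnine posr posc block) := by unfold Pre_blockCal; infer_instance
def pvWitness_blockCal : List (List Int) × List Int × Int × Int × Int :=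
  ([[1, 2, 3], [4, 5, 6], [7, 8, 9]], [1, 2, 5], 0, 0, 1)

def Spec_blockCal (arr : List (List Int)) (lisnine : List Int) (posr : Int) (posc : Int) (block : Int) (out : List Int) : Prop := out = blockCal_alt arr lisnine posr posc block
instance (arr : List (List Int)) (lisnine : List Int) (posr : Int) (posc : Int) (block : Int) (out : List Int) : Decidable (Spec_blockCal arr lisnine posr posc block out) := by unfold Spec_blockCal; infer_instance

-- ===== CLAIM =====
def Claim_equal_blockCal : Prop := ∀ (arr : List (List Int)) (lisnine : List Int) (posr : Int) (posc : Int) (block : Int), Dom_blockCal arr lisnine posr posc block → Pre_blockCal arr lisnine posr posc block → Spec_blockCal arr lisnine posr posc block (blockCal arr lisnine posr posc block)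

-- ===== LEMMAS AND PROOFS =====

def pvCells (arr : List (List Int)) (r0 c0 : Int) : List Int :=
  (PySem.List.pyRange r0 (r0 + 3) 1).flatMap
    (fun i => (PySem.List.pyRange c0 (c0 + 3) 1).map (fun j => pvCell arr i j))
def pvKeep (c : Int → Int) : List Int → List Int
  | [] => []
  | x :: xs =>
      if c x > 0 then pvKeep (fun y => if y = x then c y - 1 else c y) xs
      else x :: pvKeep c xs

theorem pvStep_eq (arr : List (List Int)) (i j : Int) (ls : List Int) :
    pvStep arr i ls j = ls.erase (pvCell arr i j) := by
  unfold pvStep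
  split
  · rfl
  · next h => exact (List.erase_of_not_mem (by simpa using h)).symm

theorem pvA_fold_eq (arr : List (List Int)) (ls : List Int) (r0 c0 : Int) :
    (PySem.List.pyRange r0 (r0 + 3) 1).foldl
        (fun ls i => (PySem.List.pyRange c0 (c0 + 3) 1).foldl (pvStep arr i) ls) ls
      = (pvCells arr r0 c0).foldl (fun ls v => ls.erase v) ls := by
  unfold pvCells
  rw [List.foldl_flatMap]
  refine List.foldl_ext _ _ ls (fun acc i _ => ?_)
  rw [List.foldl_map]
  exact List.foldl_ext _ _ acc (fun a j _ => pvStep_eq arr i j a)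

theorem pvCnt_getD (arr : List (List Int)) (r0 c0 v : Int) :
    ((PySem.List.pyRange r0 (r0 + 3) 1).foldl
        (fun d i => (PySem.List.pyRange c0 (c0 + 3) 1).foldl
          (fun d j => d.modify (pvCell arr i j) 0 (· + 1)) d)
        (PySem.Dict.empty : PySem.Dict Int Int)).getD v 0
      = ((pvCells arr r0 c0).count v : Int) := by
  have flat : (PySem.List.pyRange r0 (r0 + 3) 1).foldl
        (fun d i => (PySem.List.pyRange c0 (c0 + 3) 1).foldl
          (fun d j => d.modify (pvCell arr i j) 0 (· + 1)) d)
        (PySem.Dict.empty : PySem.Dict Int Int)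
      = (pvCells arr r0 c0).foldl (fun d x => d.modify x 0 (· + 1)) PySem.Dict.empty := by
    unfold pvCells
    rw [List.foldl_flatMap]
    refine (List.foldl_ext _ _ _ (fun d i _ => ?_)).symm
    rw [List.foldl_map]
  rw [flat, PySem.Dict.getD_foldl_modify_add_one]
  simp

theorem pvKeep_congr (c c' : Int → Int) (h : ∀ y, c y = c' y) (ls : List Int) :
    pvKeep c ls = pvKeep c' ls := by
  rw [funext h]

theorem pvKeep_bump (ls : List Int) : ∀ (c : Int → Int) (v : Int), (∀ y, 0 ≤ c y) →
    pvKeep (fun y => if y = v then c y + 1 else c y) ls = pvKeep c (ls.erase v) := by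
  induction ls with
  | nil => intro c v _; rfl
  | cons x xs ih =>
    intro c v hc
    by_cases hxv : x = v
    · subst hxv
      rw [List.erase_cons_head]
      have hpos : ((fun y => if y = x then c y + 1 else c y) x > 0) := by
        show (if x = x then c x + 1 else c x) > 0
        rw [if_pos rfl]; have := hc x; omega
      rw [pvKeep, if_pos hpos]
      exact pvKeep_congr _ _ (fun y => by by_cases h : y = x <;> simp [h]) xs
    · rw [List.erase_cons_tail (by simpa using hxv)]
      by_cases hcx : c x > 0
      · have h1 : ((fun y => if y = v then c y + 1 else c y) x > 0) := by
          simp only [if_neg hxv]; exact hcx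
        rw [pvKeep, if_pos h1, pvKeep, if_pos hcx]
        have step := pvKeep_congr
          (fun y => if y = x then (fun y => if y = v then c y + 1 else c y) y - 1
                    else (fun y => if y = v then c y + 1 else c y) y)
          (fun y => if y = v then (fun z => if z = x then c z - 1 else c z) y + 1
                    else (fun z => if z = x then c z - 1 else c z) y)
          (fun y => by by_cases h1 : y = x <;> by_cases h2 : y = v <;>
            simp [h1, h2] <;> simp_all) xs
        rw [step, ih _ v (fun y => by
          by_cases h : y = x
          · subst h; simp; omega
          · simp [h]; exact hc y)]
      · have h1 : ¬ ((fun y => if y = v then c y + 1 else c y) x > 0) := by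
          simp only [if_neg hxv]; exact hcx
        rw [pvKeep, if_neg h1, pvKeep, if_neg hcx, ih c v hc]

theorem pvErase_eq_keep (vs : List Int) : ∀ (ls : List Int),
    vs.foldl (fun ls v => ls.erase v) ls = pvKeep (fun x => (vs.count x : Int)) ls := by
  induction vs with
  | nil =>
    intro ls
    induction ls with
    | nil => rfl
    | cons x xs ih => rw [pvKeep]; simp at ih ⊢; simpa using ih
  | cons v vs ih =>
    intro ls
    simp only [List.foldl_cons]
    rw [ih (ls.erase v), ← pvKeep_bump ls (fun x => (vs.count x : Int)) v (fun y => by positivity)]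
    refine pvKeep_congr _ _ (fun y => ?_) ls
    by_cases h : y = v
    · simp [h]
    · simp [h, List.count_cons, Ne.symm h]

theorem pvB_loop_eq (ls : List Int) : ∀ (d : PySem.Dict Int Int) (acc : List Int),
    (ls.foldl
        (fun (st : PySem.Dict Int Int × List Int) x =>
          if st.1.getD x 0 > 0 then (st.1.modify x 0 (· - 1), st.2)
          else (st.1, st.2 ++ [x]))
        (d, acc)).2
      = acc ++ pvKeep (fun x => d.getD x 0) ls := by
  induction ls with
  | nil => intro d acc; simp [pvKeep]
  | cons x xs ih =>
    intro d acc
    simp only [List.foldl_cons]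
    by_cases h : d.getD x 0 > 0
    · rw [if_pos h, pvKeep, if_pos h, ih]
      congr 1
      refine pvKeep_congr _ _ (fun y => ?_) xs
      by_cases hyx : y = x
      · subst hyx; simp [PySem.Dict.getD_modify_self]
      · simp only [if_neg hyx]
        exact PySem.Dict.getD_modify_of_ne d 0 _ hyx
    · rw [if_neg h, pvKeep, if_neg h, ih]
      simp

-- the combined fact, general in the block corner
theorem pvMain (arr : List (List Int)) (ls : List Int) (r0 c0 : Int) :
    (PySem.List.pyRange r0 (r0 + 3) 1).foldl
        (fun ls i => (PySem.List.pyRange c0 (c0 + 3) 1).foldl (pvStep arr i) ls) ls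
      = (ls.foldl
          (fun (st : PySem.Dict Int Int × List Int) x =>
            if st.1.getD x 0 > 0 then (st.1.modify x 0 (· - 1), st.2)
            else (st.1, st.2 ++ [x]))
          ((PySem.List.pyRange r0 (r0 + 3) 1).foldl
            (fun d i => (PySem.List.pyRange c0 (c0 + 3) 1).foldl
              (fun d j => d.modify (pvCell arr i j) 0 (· + 1)) d)
            (PySem.Dict.empty : PySem.Dict Int Int), [])).2 := by
  rw [pvA_fold_eq, pvB_loop_eq, pvErase_eq_keep]
  simp only [List.nil_append]
  exact pvKeep_congr _ _ (fun y => by rw [pvCnt_getD]) ls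

-- ===== VERDICT =====
set_option maxHeartbeats 4000000 in
theorem blockCal_spec : Claim_equal_blockCal := by
  intro arr lisnine posr posc block _ _
  unfold Spec_blockCal
  by_cases h : 1 ≤ block ∧ block ≤ 9
  · obtain ⟨h1, h2⟩ := h
    interval_cases block <;> exact pvMain arr lisnine _ _
  · unfold blockCal blockCal_alt
    split_ifs <;> first | rfl | omega
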